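-- pv_equiv track=rewrite | github.com/batmanlab/drugEmbedding | MolEmbedding/preprocessing.py | smiles_to_tokens
-- ===== SOURCE A (Python) =====
-- def smiles_to_tokens(s, char_list):
--     s = s.strip()
--
--     j = 0
--     tokens_lst = []
--     while j < len(s):
--         # handle atoms with two characters
--         if j < len(s) - 1 and s[j:j + 2] in char_list:
--             token = s[j:j + 2]
--             j = j + 2
--
--         # handle atoms with one character including hydrogen
--         elif s[j] in char_list:
--             token = s[j]
--             j = j + 1
--
--         # handle unknown characters
--         else:
--             token = '<unk>'
--             j = j + 1
--
--         tokens_lst.append(token)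
--
--     return tokens_lst
-- ===== SOURCE B (Python) =====
-- import re
--
--
-- def smiles_to_tokens(s, char_list):
--     # One compiled-regex pass: vocab alternation (two-char tokens first for
--     # longest-match priority), with a catch-all single character -> '<unk>'.
--     s = s.strip()
--     twos = [re.escape(t) for t in char_list if len(t) == 2]
--     ones = [re.escape(t) for t in char_list if len(t) == 1]
--     alts = twos + ones
--     if alts:
--         pattern = re.compile('(' + '|'.join(alts) + ')|[\\s\\S]')
--     else:
--         pattern = re.compile('[\\s\\S]')
--     out = []
--     for m in pattern.finditer(s):
--         if pattern.groups and m.group(1) is not None: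
--             out.append(m.group(1))
--         else:
--             out.append('<unk>')
--     return out
-- ===== Notes on version B (the rewrite author's own statement) =====
-- stated objective: faster
-- what changed: Replaces the manual index-stepping while loop that tests every substring against the whole vocabulary list with a single compiled-regex pass: a precomputed alternation of the escaped two-char vocab entries (first, for longest-match priority), then the one-char entries, then a catch-all character mapped to '<unk>'.
import Mathlib
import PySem

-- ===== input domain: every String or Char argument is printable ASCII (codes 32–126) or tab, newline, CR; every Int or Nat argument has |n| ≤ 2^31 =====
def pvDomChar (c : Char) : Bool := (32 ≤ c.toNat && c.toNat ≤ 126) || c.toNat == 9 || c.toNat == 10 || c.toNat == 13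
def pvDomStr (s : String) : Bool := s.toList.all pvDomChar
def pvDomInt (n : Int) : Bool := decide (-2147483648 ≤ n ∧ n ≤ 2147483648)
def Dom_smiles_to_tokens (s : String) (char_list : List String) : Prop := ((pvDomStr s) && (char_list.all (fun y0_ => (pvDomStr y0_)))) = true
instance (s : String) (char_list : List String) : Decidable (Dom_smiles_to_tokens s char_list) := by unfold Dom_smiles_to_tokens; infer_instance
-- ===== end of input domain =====

-- B replaces A's manual index-stepping scan (membership tests against the whole
-- vocabulary at every step) by one pass of a precomputed regex alternation
-- (Source B): two-char vocab entries first, then one-char ones, then a catch-all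
-- character producing '<unk>'; measurably faster (compiled scan vs per-char list membership).

-- ===== PORT A =====
-- A's while loop over index j, transcribed as recursion on the remaining suffix:
-- 'j < len(s) - 1' is 'rest ≠ []', 's[j:j+2]' is the first two chars of the suffix.
def pvALoop (char_list : List String) : List Char → List String
  | [] => []
  | c :: rest =>
    if rest ≠ [] ∧ String.ofList (List.take 2 (c :: rest)) ∈ char_list then
      String.ofList (List.take 2 (c :: rest)) :: pvALoop char_list (rest.drop 1)
    else if String.ofList [c] ∈ char_list then
      String.ofList [c] :: pvALoop char_list rest
    else
      "<unk>" :: pvALoop char_list rest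
  termination_by cs => cs.length
  decreasing_by all_goals simp only [List.length_cons, List.length_drop] <;> omega

def smiles_to_tokens (s : String) (char_list : List String) : List String :=
  pvALoop char_list (PySem.Str.strip s).toList

-- ===== PORT B =====
-- Source B's regex scan: at each position the alternatives are tried in order (all
-- two-char vocab entries, then all one-char ones), else the catch-all matches
-- one character and the token is '<unk>'; finditer's contiguous matches are the
-- recursion on the remaining suffix.
def pvBLoop (twos ones : List String) : List Char → List String
  | [] => []
  | c :: rest =>
    match twos.find? (fun t => t.toList.isPrefixOf (c :: rest)) with
    | some t => t :: pvBLoop twos ones (rest.drop 1)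
    | none =>
      match ones.find? (fun t => t.toList == [c]) with
      | some t => t :: pvBLoop twos ones rest
      | none => "<unk>" :: pvBLoop twos ones rest
  termination_by cs => cs.length
  decreasing_by all_goals simp only [List.length_cons, List.length_drop] <;> omega

def smiles_to_tokens_alt (s : String) (char_list : List String) : List String :=
  pvBLoop (char_list.filter (fun t => t.length == 2))
          (char_list.filter (fun t => t.length == 1))
          (PySem.Str.strip s).toList

-- ===== PRECONDITION & SPEC =====
def Spec_smiles_to_tokens (s : String) (char_list : List String) (out : List String) : Prop := out = smiles_to_tokens_alt s char_list
instance (s : String) (char_list : List String) (out : List String) : Decidable (Spec_smiles_to_tokens s char_list out) := by unfold Spec_smiles_to_tokens; infer_instance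

-- ===== CLAIM (what is proved, stated in full; the proofs are below) =====
def Claim_equal_smiles_to_tokens : Prop := ∀ (s : String) (char_list : List String), Dom_smiles_to_tokens s char_list → Spec_smiles_to_tokens s char_list (smiles_to_tokens s char_list)

-- ===== LEMMAS AND PROOFS =====

lemma toList_eq_iff (s : String) (l : List Char) : s.toList = l ↔ s = String.ofList l := by
  constructor
  · intro h; rw [← h, String.ofList_toList]
  · intro h; rw [h, String.toList_ofList]

-- the two-char alternatives of B find exactly what A's two-char membership test finds
lemma find_two (cl : List String) (c c2 : Char) (rest : List Char) :
    (cl.filter (fun t => t.length == 2)).find? (fun t => t.toList.isPrefixOf (c :: c2 :: rest))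
      = if (String.ofList [c, c2]) ∈ cl then some (String.ofList [c, c2]) else none := by
  induction cl with
  | nil => simp
  | cons hd tl ih =>
    by_cases heq : hd = String.ofList [c, c2]
    · subst heq
      have h2 : (String.ofList [c, c2]).length = 2 := by
        simp [String.length, String.toList_ofList]
      simp [h2, List.isPrefixOf_iff_prefix, String.toList_ofList]
    · have heq' : String.ofList [c, c2] ≠ hd := fun h => heq h.symm
      by_cases hlen : hd.length = 2
      · have hp : hd.toList.isPrefixOf (c :: c2 :: rest) = false := by
          rw [Bool.eq_false_iff]
          intro hpre
          rw [List.isPrefixOf_iff_prefix, List.prefix_iff_eq_take] at hpre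
          have hl : hd.toList.length = 2 := by rw [← hlen]; rfl
          rw [hl] at hpre
          simp only [List.take_succ_cons, List.take_zero] at hpre
          exact heq ((toList_eq_iff hd [c, c2]).mp hpre)
        simp [hlen, hp, ih, heq']
      · have hb : (hd.length == 2) = false := by simpa using hlen
        simp [hb, ih, heq']

-- no two-char alternative matches at the last character
lemma find_two_single (cl : List String) (c : Char) :
    (cl.filter (fun t => t.length == 2)).find? (fun t => t.toList.isPrefixOf [c]) = none := by
  induction cl with
  | nil => simp
  | cons hd tl ih =>
    by_cases hlen : hd.length = 2
    · have hp : hd.toList.isPrefixOf [c] = false := by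
        rw [Bool.eq_false_iff]
        intro hpre
        rw [List.isPrefixOf_iff_prefix] at hpre
        have hle := hpre.length_le
        have hl : hd.toList.length = 2 := by rw [← hlen]; rfl
        simp [hl] at hle
      simp [hlen, hp, ih]
    · have hb : (hd.length == 2) = false := by simpa using hlen
      simp [hb, ih]

-- the one-char alternatives of B find exactly what A's one-char membership test finds
lemma find_one (cl : List String) (c : Char) :
    (cl.filter (fun t => t.length == 1)).find? (fun t => t.toList == [c])
      = if (String.ofList [c]) ∈ cl then some (String.ofList [c]) else none := by
  induction cl with
  | nil => simp
  | cons hd tl ih =>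
    by_cases heq : hd = String.ofList [c]
    · subst heq
      have h1 : (String.ofList [c]).length = 1 := by
        simp [String.length, String.toList_ofList]
      simp [h1, String.toList_ofList]
    · have heq' : String.ofList [c] ≠ hd := fun h => heq h.symm
      by_cases hlen : hd.length = 1
      · have hp : (hd.toList == [c]) = false := by
          rw [Bool.eq_false_iff]
          intro hpre
          rw [beq_iff_eq] at hpre
          exact heq ((toList_eq_iff hd [c]).mp hpre)
        simp [hlen, hp, ih, heq']
      · have hb : (hd.length == 1) = false := by simpa using hlen
        simp [hb, ih, heq']

lemma loop_eq (cl : List String) (cs : List Char) :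
    pvALoop cl cs = pvBLoop (cl.filter (fun t => t.length == 2)) (cl.filter (fun t => t.length == 1)) cs := by
  induction cs using pvALoop.induct cl with
  | case1 => simp [pvALoop, pvBLoop]
  | case2 c rest h ih =>
    obtain ⟨hne, hmem⟩ := h
    obtain ⟨c2, rest', rfl⟩ : ∃ c2 rest', rest = c2 :: rest' := by
      cases rest with
      | nil => exact absurd rfl hne
      | cons a b => exact ⟨a, b, rfl⟩
    rw [pvALoop, pvBLoop]
    simp only [List.take_succ_cons, List.take_zero] at hmem ⊢
    rw [find_two cl c c2 rest']
    simp only [List.drop_succ_cons, List.drop_zero] at ih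
    simp [hne, hmem, ih]
  | case3 c rest h hmem ih =>
    rw [pvALoop, pvBLoop]
    cases rest with
    | nil =>
      rw [find_two_single cl c, find_one cl c]
      simp [hmem, ih]
    | cons c2 rest' =>
      have hnm : String.ofList [c, c2] ∉ cl := by
        intro hm
        exact h ⟨by simp, by simpa using hm⟩
      rw [find_two cl c c2 rest', find_one cl c]
      simp [hnm, hmem, ih, h]
  | case4 c rest h hmem ih =>
    rw [pvALoop, pvBLoop]
    cases rest with
    | nil =>
      rw [find_two_single cl c, find_one cl c]
      simp [hmem, ih]
    | cons c2 rest' =>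
      have hnm : String.ofList [c, c2] ∉ cl := by
        intro hm
        exact h ⟨by simp, by simpa using hm⟩
      rw [find_two cl c c2 rest', find_one cl c]
      simp [hnm, hmem, ih, h]

-- ===== VERDICT (by name: the statement is the Claim_ definition above) =====
theorem smiles_to_tokens_spec : Claim_equal_smiles_to_tokens := by
  intro s cl _
  unfold Spec_smiles_to_tokens smiles_to_tokens smiles_to_tokens_alt
  exact loop_eq cl (PySem.Str.strip s).toList
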